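-- pv_equiv track=rewrite | github.com/whatotherguy/auto-book | apps/api/app/services/detect.py | _find_anchor_after_index
-- ===== SOURCE A (Python) =====
-- from collections.abc import Sequence
--
-- def _find_anchor_after_index(values: Sequence[str], anchor: Sequence[str], start_index: int, lookahead: int) -> int | None:
--     if not anchor:
--         return None
--
--     anchor_list = list(anchor)
--     n = len(anchor_list)
--     end = min(len(values) - n, start_index + lookahead)
--     for index in range(max(0, start_index), end + 1):
--         if values[index : index + n] == anchor_list:
--             return index
--
--     return None
-- ===== SOURCE B (Python) =====
-- def _find_anchor_after_index(values, anchor, start_index, lookahead):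
--     if not anchor:
--         return None
--
--     pattern = list(anchor)
--     n = len(pattern)
--     end = min(len(values) - n, start_index + lookahead)
--     lo = max(0, start_index)
--     if end < lo:
--         return None
--
--     # Shift-And (bitap): bit k of mask[tok] set iff pattern[k] == tok.
--     mask = {}
--     for k, tok in enumerate(pattern):
--         mask[tok] = mask.get(tok, 0) | (1 << k)
--
--     goal = 1 << (n - 1)
--     state = 0  # bit k set iff pattern[:k+1] is a suffix of the scanned window prefix
--     pos = lo - n + 1  # start index of a match ending at the current token
--     for tok in values[lo:end + n]:
--         state = ((state << 1) | 1) & mask.get(tok, 0)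
--         if state & goal:
--             return pos
--         pos += 1
--     return None
-- ===== Notes on version B (the rewrite author's own statement) =====
-- stated objective: alternative
-- what changed: Replaces the per-index slice comparison with the Shift-And (bitap) algorithm: a bitmask per distinct anchor token is precomputed once and a single pass over the window updates a bit-parallel automaton state, reporting the first position whose high bit signals a full match.
import Mathlib
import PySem

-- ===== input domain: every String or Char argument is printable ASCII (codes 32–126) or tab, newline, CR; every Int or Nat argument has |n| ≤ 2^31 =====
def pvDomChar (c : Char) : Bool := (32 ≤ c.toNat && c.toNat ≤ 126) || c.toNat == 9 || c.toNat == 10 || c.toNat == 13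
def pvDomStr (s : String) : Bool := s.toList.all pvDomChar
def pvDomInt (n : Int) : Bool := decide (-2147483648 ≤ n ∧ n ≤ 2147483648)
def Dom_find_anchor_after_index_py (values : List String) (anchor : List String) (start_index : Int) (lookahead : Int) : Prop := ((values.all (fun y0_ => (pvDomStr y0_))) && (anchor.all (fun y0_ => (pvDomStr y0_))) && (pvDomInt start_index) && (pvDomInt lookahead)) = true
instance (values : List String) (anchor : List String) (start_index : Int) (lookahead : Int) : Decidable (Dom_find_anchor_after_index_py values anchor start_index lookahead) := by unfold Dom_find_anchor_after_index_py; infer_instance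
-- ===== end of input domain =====

-- B replaces A's per-index slice comparison with the Shift-And (bitap) algorithm:
-- one precomputed bitmask per distinct anchor token and a single bit-parallel pass
-- over the lookahead window (objective: alternative algorithm, similar cost).

-- ===== PORT A =====
-- the 'for index in range(...): if values[index:index+n] == anchor_list: return index' loop
def pvALoop (values anchor : List String) (n : Int) : List Int → Option Int
  | [] => none
  | i :: rest =>
    if PySem.List.slice values (some i) (some (i + n)) = anchor then some i
    else pvALoop values anchor n rest

def find_anchor_after_index_py (values : List String) (anchor : List String) (start_index : Int) (lookahead : Int) : Option Int :=
  if anchor = [] then none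
  else
    let n : Int := anchor.length
    let e : Int := min ((values.length : Int) - n) (start_index + lookahead)
    pvALoop values anchor n (PySem.List.pyRange (max 0 start_index) (e + 1) 1)

-- ===== PORT B =====
-- 'for k, tok in enumerate(pattern): mask[tok] = mask.get(tok, 0) | (1 << k)'
-- (k is the nonnegative enumerate counter, so '1 << k' is '1 <<< k.toNat')
def pvMask (p : List String) : PySem.Dict String Nat :=
  (PySem.List.enumerate p 0).foldl
    (fun m kt => m.insert kt.2 ((m.getD kt.2 0) ||| (1 <<< kt.1.toNat))) PySem.Dict.empty

-- the 'for tok in values[lo:end+n]: state = ((state << 1) | 1) & mask.get(tok, 0); …' loop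
def pvBScan (mask : PySem.Dict String Nat) (goal : Nat) : List String → Nat → Int → Option Int
  | [], _, _ => none
  | tok :: rest, state, pos =>
    let st := ((state <<< 1) ||| 1) &&& mask.getD tok 0
    if st &&& goal ≠ 0 then some pos else pvBScan mask goal rest st (pos + 1)

def find_anchor_after_index_py_alt (values : List String) (anchor : List String) (start_index : Int) (lookahead : Int) : Option Int :=
  match anchor with
  | [] => none
  | a :: rest =>
    let p := a :: rest
    let n : Int := p.length
    let e : Int := min ((values.length : Int) - n) (start_index + lookahead)
    let lo : Int := max 0 start_index
    if e < lo then none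
    else
      pvBScan (pvMask p) (1 <<< (p.length - 1))
        (PySem.List.slice values (some lo) (some (e + n))) 0 (lo - n + 1)

-- ===== PRECONDITION & SPEC =====
def Spec_find_anchor_after_index_py (values : List String) (anchor : List String) (start_index : Int) (lookahead : Int) (out : Option Int) : Prop := out = find_anchor_after_index_py_alt values anchor start_index lookahead
instance (values : List String) (anchor : List String) (start_index : Int) (lookahead : Int) (out : Option Int) : Decidable (Spec_find_anchor_after_index_py values anchor start_index lookahead out) := by unfold Spec_find_anchor_after_index_py; infer_instance

-- ===== CLAIM (what is proved, stated in full; the proofs are below) =====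
def Claim_equal_find_anchor_after_index_py : Prop := ∀ (values : List String) (anchor : List String) (start_index : Int) (lookahead : Int), Dom_find_anchor_after_index_py values anchor start_index lookahead → Spec_find_anchor_after_index_py values anchor start_index lookahead (find_anchor_after_index_py values anchor start_index lookahead)

-- ===== LEMMAS AND PROOFS =====

-- x &&& 2^i is nonzero exactly when bit i of x is set
theorem pvAndPow (x : Nat) (i : Nat) : (x &&& (1 <<< i) ≠ 0) ↔ x.testBit i := by
  rw [Nat.shiftLeft_eq, one_mul, Nat.and_two_pow]
  cases h : x.testBit i <;> simp_all

-- the mask-building fold, bit by bit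
theorem pvMask_foldl (l : List (Int × String)) (m : PySem.Dict String Nat) (tok : String) (k : Nat) :
    ((l.foldl (fun m kt => m.insert kt.2 ((m.getD kt.2 0) ||| (1 <<< kt.1.toNat))) m).getD tok 0).testBit k
      ↔ ((m.getD tok 0).testBit k ∨ ∃ kt ∈ l, kt.2 = tok ∧ kt.1.toNat = k) := by
  induction l generalizing m with
  | nil => simp
  | cons kt rest ih =>
    rw [List.foldl_cons, ih, PySem.Dict.getD_insert]
    by_cases h : tok = kt.2
    · rw [if_pos h]
      subst h
      simp only [Nat.testBit_or, Nat.shiftLeft_eq, one_mul, Nat.testBit_two_pow,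
        Bool.or_eq_true, decide_eq_true_eq, List.mem_cons]
      constructor
      · rintro ((hb | hbit) | ⟨x, hx, hxt, hxk⟩)
        · exact Or.inl hb
        · exact Or.inr ⟨kt, Or.inl rfl, rfl, hbit⟩
        · exact Or.inr ⟨x, Or.inr hx, hxt, hxk⟩
      · rintro (hb | ⟨x, (rfl | hx), hxt, hxk⟩)
        · exact Or.inl (Or.inl hb)
        · exact Or.inl (Or.inr hxk)
        · exact Or.inr ⟨x, hx, hxt, hxk⟩
    · rw [if_neg h]
      simp only [List.mem_cons]
      constructor
      · rintro (hb | ⟨x, hx, hxt, hxk⟩)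
        · exact Or.inl hb
        · exact Or.inr ⟨x, Or.inr hx, hxt, hxk⟩
      · rintro (hb | ⟨x, (rfl | hx), hxt, hxk⟩)
        · exact Or.inl hb
        · exact absurd hxt.symm h
        · exact Or.inr ⟨x, hx, hxt, hxk⟩

-- characterization of the mask dictionary: bit k of mask[tok] ⟺ p[k] = tok
theorem pvMask_testBit (p : List String) (tok : String) (k : Nat) :
    ((pvMask p).getD tok 0).testBit k ↔ (k < p.length ∧ p[k]? = some tok) := by
  unfold pvMask
  rw [pvMask_foldl]
  simp only [PySem.Dict.getD_empty, Nat.zero_testBit, Bool.false_eq_true, false_or]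
  constructor
  · rintro ⟨kt, hmem, hxt, hxk⟩
    rcases (PySem.List.mem_enumerate_iff p 0 kt).mp hmem with ⟨j, hj, rfl⟩
    simp only at hxt hxk
    have hjk : j = k := by omega
    subst hjk
    exact ⟨hj, by rw [List.getElem?_eq_getElem hj, hxt]⟩
  · rintro ⟨hk, hget⟩
    refine ⟨((k : Int), tok), ?_, rfl, by simp⟩
    rw [PySem.List.mem_enumerate_iff]
    refine ⟨k, hk, ?_⟩
    have hg := List.getElem?_eq_getElem hk
    rw [hg] at hget
    simp only [Option.some_inj] at hget
    simp [hget]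

-- suffix step: (u ++ [a]) <:+ (s ++ [b]) ↔ a = b ∧ u <:+ s
theorem pvSuffixSnoc {α : Type} (u s : List α) (a b : α) :
    (u ++ [a]) <:+ (s ++ [b]) ↔ a = b ∧ u <:+ s := by
  rw [← List.reverse_prefix]
  simp only [List.reverse_append, List.reverse_singleton, List.singleton_append]
  rw [List.cons_prefix_cons, List.reverse_prefix]

-- the automaton invariant: bit k of the state ⟺ p.take (k+1) is a suffix of the scanned prefix
def pvInv (p : List String) (st : Nat) (s : List String) : Prop :=
  ∀ k : Nat, st.testBit k ↔ (k < p.length ∧ p.take (k + 1) <:+ s)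

theorem pvInv_zero (p : List String) : pvInv p 0 [] := by
  intro k
  simp only [Nat.zero_testBit, Bool.false_eq_true, false_iff, not_and]
  intro hk hsuf
  have := List.suffix_nil.mp hsuf
  have hlen := congrArg List.length this
  simp only [List.length_take, List.length_nil] at hlen
  omega

theorem pvTestBitOne (k : Nat) : (1 : Nat).testBit k = decide (0 = k) := by
  rw [show (1 : Nat) = 2 ^ 0 from rfl, Nat.testBit_two_pow]

theorem pvInv_step (p : List String) (st : Nat) (s : List String) (tok : String)
    (h : pvInv p st s) :
    pvInv p (((st <<< 1) ||| 1) &&& (pvMask p).getD tok 0) (s ++ [tok]) := by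
  intro k
  have hmask := pvMask_testBit p tok k
  rw [Nat.testBit_and, Nat.testBit_or, Nat.testBit_shiftLeft, pvTestBitOne]
  simp only [Bool.and_eq_true, Bool.or_eq_true, decide_eq_true_eq, ge_iff_le]
  rw [hmask]
  by_cases hk : k < p.length
  · have hgk : p[k]? = some p[k] := List.getElem?_eq_getElem hk
    have htake : p.take (k + 1) = p.take k ++ [p[k]] := by
      rw [List.take_add_one, hgk]; rfl
    rw [htake, pvSuffixSnoc, hgk]
    rcases Nat.eq_zero_or_pos k with hk0 | hkpos
    · subst hk0
      simp only [List.take_zero, List.nil_suffix, and_true, Option.some_inj]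
      constructor
      · rintro ⟨_, _, htok⟩; exact ⟨hk, htok⟩
      · rintro ⟨_, htok⟩; exact ⟨by simp, hk, htok⟩
    · have hk1 : k - 1 + 1 = k := by omega
      have hst := h (k - 1)
      rw [hk1] at hst
      constructor
      · rintro ⟨(⟨_, hb⟩ | h0), _, htok⟩
        · exact ⟨hk, Option.some_inj.mp htok, (hst.mp hb).2⟩
        · omega
      · rintro ⟨_, htok, hsuf⟩
        exact ⟨Or.inl ⟨hkpos, hst.mpr ⟨by omega, hsuf⟩⟩, hk, by rw [htok]⟩
  · simp [hk]

-- reference scan: test the full anchor as a suffix of each window prefix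
def pvSpecScan (p : List String) : List String → List String → Int → Option Int
  | _, [], _ => none
  | s, tok :: rest, pos =>
    if p.isSuffixOf (s ++ [tok]) then some pos else pvSpecScan p (s ++ [tok]) rest (pos + 1)

theorem pvBScan_eq_specScan (p : List String) (hne : p ≠ []) (w : List String) :
    ∀ (s : List String) (st : Nat) (pos : Int), pvInv p st s →
    pvBScan (pvMask p) (1 <<< (p.length - 1)) w st pos = pvSpecScan p s w pos := by
  induction w with
  | nil => intro s st pos _; rfl
  | cons tok rest ih =>
    intro s st pos h
    have hstep := pvInv_step p st s tok h
    have hn1 : p.length - 1 + 1 = p.length := by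
      cases p with
      | nil => exact absurd rfl hne
      | cons a t => simp
    have hcond : ((((st <<< 1) ||| 1) &&& (pvMask p).getD tok 0) &&& (1 <<< (p.length - 1)) ≠ 0)
        ↔ p.isSuffixOf (s ++ [tok]) = true := by
      rw [pvAndPow, hstep (p.length - 1), hn1, List.take_length, List.isSuffixOf_iff_suffix]
      constructor
      · rintro ⟨_, h2⟩; exact h2
      · intro h2
        refine ⟨?_, h2⟩
        cases p with
        | nil => exact absurd rfl hne
        | cons a t => simp
    simp only [pvBScan, pvSpecScan]
    by_cases hc : p.isSuffixOf (s ++ [tok]) = true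
    · rw [if_pos (hcond.mpr hc), if_pos hc]
    · rw [if_neg (fun hh => hc (hcond.mp hh)), if_neg hc]
      exact ih (s ++ [tok]) _ (pos + 1) hstep

-- pvSpecScan as a find? over window-prefix indices
theorem pvSpecScan_eq_find (p : List String) (w : List String) :
    ∀ (s : List String) (pos : Int),
    pvSpecScan p s w pos
      = ((List.range w.length).find? (fun j => p.isSuffixOf (s ++ w.take (j + 1)))).map
          (fun j : Nat => pos + (j : Int)) := by
  induction w with
  | nil => intro s pos; rfl
  | cons tok rest ih =>
    intro s pos
    rw [List.length_cons, List.range_succ_eq_map]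
    simp only [pvSpecScan]
    by_cases hc : p.isSuffixOf (s ++ [tok]) = true
    · rw [if_pos hc, List.find?_cons_of_pos (by simpa using hc)]
      simp
    · rw [if_neg hc, List.find?_cons_of_neg (by simpa using hc), List.find?_map,
        ih (s ++ [tok]) (pos + 1)]
      have hpred : ((fun j => p.isSuffixOf (s ++ (tok :: rest).take (j + 1))) ∘ Nat.succ)
          = fun j => p.isSuffixOf ((s ++ [tok]) ++ rest.take (j + 1)) := by
        funext j
        simp only [Function.comp_apply, List.take_succ_cons, List.append_assoc,
          List.singleton_append]
      rw [hpred]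
      rcases hf : (List.range rest.length).find?
          (fun j => p.isSuffixOf ((s ++ [tok]) ++ rest.take (j + 1))) with _ | j
      · rfl
      · simp only [Option.map_some, Nat.succ_eq_add_one]
        congr 1
        push_cast
        ring

-- pvALoop as a find? over the index list
theorem pvALoop_eq_find (values anchor : List String) (n : Int) (l : List Int) :
    pvALoop values anchor n l
      = l.find? (fun i => PySem.List.slice values (some i) (some (i + n)) == anchor) := by
  induction l with
  | nil => rfl
  | cons i rest ih =>
    by_cases h : PySem.List.slice values (some i) (some (i + n)) = anchor
    · rw [pvALoop, if_pos h, List.find?_cons_of_pos (by simpa using h)]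
    · rw [pvALoop, if_neg h, List.find?_cons_of_neg (by simpa using h), ih]

-- find? only looks at members
theorem pvFindCongr (l : List Nat) (p q : Nat → Bool) (h : ∀ x ∈ l, p x = q x) :
    l.find? p = l.find? q := by
  induction l with
  | nil => rfl
  | cons a rest ih =>
    have ha := h a (List.mem_cons_self)
    by_cases hp : p a = true
    · rw [List.find?_cons_of_pos hp, List.find?_cons_of_pos (ha ▸ hp)]
    · rw [List.find?_cons_of_neg hp, List.find?_cons_of_neg (by rw [← ha]; exact hp),
        ih (fun x hx => h x (List.mem_cons_of_mem a hx))]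

-- a first-match search whose predicate is false on the first m indices is a shifted search
theorem pvShift (m R : Nat) (predB pred : Nat → Bool)
    (h0 : ∀ j < m, predB j = false) (h1 : ∀ k < R, predB (m + k) = pred k) :
    (List.range (m + R)).find? predB = ((List.range R).find? pred).map (m + ·) := by
  rw [List.range_add, List.find?_append]
  have hnone : (List.range m).find? predB = none :=
    List.find?_eq_none.mpr (fun x hx => by simp [h0 x (List.mem_range.mp hx)])
  rw [hnone, Option.none_or, List.find?_map,
      pvFindCongr _ (predB ∘ (m + ·)) pred (fun k hk => h1 k (List.mem_range.mp hk))]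

-- ===== VERDICT (by name: the statement is the Claim_ definition above) =====
theorem find_anchor_after_index_py_spec : Claim_equal_find_anchor_after_index_py := by
  intro values anchor start_index lookahead _dom
  unfold Spec_find_anchor_after_index_py
  cases anchor with
  | nil => simp [find_anchor_after_index_py, find_anchor_after_index_py_alt]
  | cons a rest =>
    have hpne : (a :: rest) ≠ ([] : List String) := by simp
    simp only [find_anchor_after_index_py, find_anchor_after_index_py_alt, if_neg hpne]
    set p : List String := a :: rest with hp
    set n : Nat := p.length with hn
    have hn1 : 1 ≤ n := by rw [hn, hp]; simp
    set lo : Int := max 0 start_index with hlo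
    set e : Int := min ((values.length : Int) - (n : Int)) (start_index + lookahead) with he
    have hlo0 : 0 ≤ lo := le_max_left 0 start_index
    by_cases hel : e < lo
    · rw [if_pos hel, PySem.List.pyRange_one_eq_nil (by omega), pvALoop]
    · rw [not_lt] at hel
      rw [if_neg (by omega)]
      have hEv : e + (n : Int) ≤ (values.length : Int) := by
        have h1 := min_le_left ((values.length : Int) - (n : Int)) (start_index + lookahead)
        rw [← he] at h1
        omega
      set L : Nat := lo.toNat with hL
      set E : Nat := e.toNat with hE
      have hloL : lo = (L : Int) := by rw [hL]; omega
      have heE : e = (E : Int) := by rw [hE]; omega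
      have hLE : L ≤ E := by omega
      have hEvN : E + n ≤ values.length := by
        have : ((E + n : Nat) : Int) ≤ (values.length : Int) := by push_cast; omega
        exact_mod_cast this
      -- the window and its length
      set w : List String := PySem.List.slice values (some lo) (some (e + (n : Int))) with hw
      have hwdt : w = (values.drop L).take (E + n - L) := by
        rw [hw, PySem.List.slice_toNat values hlo0 (by omega)]
        congr 1
        omega
      have hwlen : w.length = E + n - L := by
        rw [hwdt]
        simp only [List.length_take, List.length_drop]
        omega
      -- B as a find? over window-prefix indices
      rw [pvBScan_eq_specScan p hpne w [] 0 (lo - (n : Int) + 1) (pvInv_zero p),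
        pvSpecScan_eq_find]
      simp only [List.nil_append]
      -- A as a find? over the shifted index range
      rw [pvALoop_eq_find, PySem.List.pyRange_one lo (e + 1),
        show (e + 1 - lo).toNat = E + 1 - L from by omega, List.find?_map]
      -- the two predicates agree index for index on the window
      have hwin : ∀ k, k < E + 1 - L →
          (fun j => p.isSuffixOf (w.take (j + 1))) ((n - 1) + k)
            = ((fun i => PySem.List.slice values (some i) (some (i + (n : Int))) == p)
                ∘ (fun k : Nat => lo + (k : Int))) k := by
        intro k hk
        simp only [Function.comp_apply]
        have h1 : (n - 1) + k + 1 = n + k := by omega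
        have htk : w.take (n + k) = (values.drop L).take (n + k) := by
          rw [hwdt, List.take_take]
          congr 1
          omega
        have hlen2 : ((values.drop L).take (n + k)).length = n + k := by
          simp only [List.length_take, List.length_drop]
          omega
        have hdrop : ((values.drop L).take (n + k)).drop k = (values.drop (L + k)).take n := by
          rw [List.drop_take, List.drop_drop]
          congr 1
          omega
        have hsl : PySem.List.slice values (some (lo + (k : Int)))
            (some (lo + (k : Int) + (n : Int))) = (values.drop (L + k)).take n := by
          rw [PySem.List.slice_toNat values (by omega) (by omega)]
          congr 1
          · omega
          · congr 1; omega
        rw [h1, htk, hsl, Bool.eq_iff_iff]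
        simp only [List.isSuffixOf_iff_suffix, beq_iff_eq]
        rw [List.suffix_iff_eq_drop, hlen2, show n + k - p.length = k from by omega, hdrop]
        exact eq_comm
      rw [show w.length = (n - 1) + (E + 1 - L) from by omega,
        pvShift (n - 1) (E + 1 - L) _ _
          (fun j hj => by
            simp only [List.isSuffixOf_iff_suffix, Bool.eq_false_iff, ne_eq]
            intro hsuf
            have hle := List.IsSuffix.length_le hsuf
            rw [List.length_take, hwlen] at hle
            simp only [← hn] at hle
            omega)
          hwin]
      rcases hf : (List.range (E + 1 - L)).find?
          ((fun i => PySem.List.slice values (some i) (some (i + (n : Int))) == p)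
            ∘ (fun k : Nat => lo + (k : Int))) with _ | j
      · rfl
      · simp only [Option.map_some]
        congr 1
        push_cast
        omega
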